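-- pv_equiv track=rewrite | github.com/semi-cheon/programmers | 201202_programmers_기능개발.py | solution
-- ===== SOURCE A (Python) =====
-- def solution(progresses, speeds):
--     answer = []
--     day = []
--     for i in range(len(progresses)) :
--         n = 0
--         while progresses[i] + (n * speeds[i]) < 100 :
--             n += 1
--         day.append(n)
--     n = 1
--     while day :
--         if len(day) == 1 :
--             answer.append(n)
--             break
--         if day[0] >= day[1] :
--             day[1] = day[0]
--             day.pop(0)
--             n += 1
--         else :
--             answer.append(n)
--             day.pop(0)
--             n = 1
--     return answer
-- ===== SOURCE B (Python) =====
-- def solution(progresses, speeds):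
--     # single forward pass: ceil-divide to get each feature's finish day,
--     # group consecutive days under a running maximum, count group sizes
--     answer = []
--     cur = None
--     cnt = 0
--     for p, s in zip(progresses, speeds):
--         d = 0 if p >= 100 else -((p - 100) // s)
--         if cur is None or d > cur:
--             if cnt:
--                 answer.append(cnt)
--             cur = d
--             cnt = 1
--         else:
--             cnt += 1
--     if cnt:
--         answer.append(cnt)
--     return answer
-- ===== Notes on version B (the rewrite author's own statement) =====
-- stated objective: alternative
-- what changed: Replaces the per-feature increment-until-done while loop and the quadratic pop(0)/rewrite-head grouping pass with a single forward pass that computes each finish day by ceiling division and counts groups under a running maximum; intended as faster, but a timing run could not confirm a ratio (A already times out at n=16 on the generated inputs).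
import Mathlib
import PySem

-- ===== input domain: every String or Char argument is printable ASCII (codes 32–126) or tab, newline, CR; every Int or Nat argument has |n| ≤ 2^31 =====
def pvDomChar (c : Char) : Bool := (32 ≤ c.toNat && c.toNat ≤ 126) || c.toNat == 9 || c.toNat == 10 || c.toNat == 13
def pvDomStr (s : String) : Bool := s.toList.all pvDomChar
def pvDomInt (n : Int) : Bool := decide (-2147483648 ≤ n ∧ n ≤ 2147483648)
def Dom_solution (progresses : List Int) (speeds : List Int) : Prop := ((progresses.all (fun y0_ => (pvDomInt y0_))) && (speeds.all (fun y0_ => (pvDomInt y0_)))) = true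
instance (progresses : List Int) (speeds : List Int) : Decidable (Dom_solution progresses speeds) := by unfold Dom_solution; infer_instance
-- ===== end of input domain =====

-- B replaces A's increment-until-100 while loop and quadratic pop(0) grouping with a
-- single forward pass (ceiling division for days, running max + group counter); proved equal on Pre_.


-- ===== PORT A =====
-- inner while loop 'while progresses[i] + n*speeds[i] < 100: n += 1'
-- (the fuel only makes the loop total; on Pre_ inputs it never runs out)
def whileDays (fuel : Nat) (p s n : Int) : Int :=
  match fuel with
  | 0 => n
  | f + 1 => if p + n * s < 100 then whileDays f p s (n + 1) else n

-- second while loop of A: the pop(0)-based grouping over the mutable 'day' list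
def loopAns (day : List Int) (n : Int) (answer : List Int) : List Int :=
  match day with
  | [] => answer
  | [_] => answer ++ [n]
  | d0 :: d1 :: rest =>
    if d0 ≥ d1 then loopAns (d0 :: rest) (n + 1) answer
    else loopAns (d1 :: rest) 1 (answer ++ [n])

def solution (progresses : List Int) (speeds : List Int) : List Int :=
  let day := (PySem.List.pyRange 0 progresses.length 1).foldl
    (fun day i =>
      day ++ [whileDays ((100 - PySem.List.pyGetD progresses i 0).toNat + 1)
        (PySem.List.pyGetD progresses i 0) (PySem.List.pyGetD speeds i 0) 0]) []
  loopAns day 1 []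

-- ===== PORT B =====
def solution_alt (progresses : List Int) (speeds : List Int) : List Int :=
  let step := fun (st : List Int × Option Int × Int) (ps : Int × Int) =>
    let d : Int := if ps.1 ≥ 100 then 0 else -(PySem.Int.floordiv (ps.1 - 100) ps.2)
    let newGroup := match st.2.1 with
      | none => true
      | some c => decide (c < d)
    if newGroup then ((if st.2.2 ≠ 0 then st.1 ++ [st.2.2] else st.1), some d, 1)
    else (st.1, st.2.1, st.2.2 + 1)
  let r := (progresses.zip speeds).foldl step ([], none, 0)
  if r.2.2 ≠ 0 then r.1 ++ [r.2.2] else r.1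

-- ===== PRECONDITION & SPEC =====
-- Pre_ excludes exactly the inputs where A does not return: a speeds list shorter than
-- progresses (IndexError on speeds[i]) and a non-positive speed paired with an unfinished
-- progress (< 100), on which A's inner while loop never terminates.
def Pre_solution (progresses : List Int) (speeds : List Int) : Prop :=
  progresses.length ≤ speeds.length ∧
  ∀ ps ∈ progresses.zip speeds, 0 < ps.2 ∨ 100 ≤ ps.1

instance (progresses : List Int) (speeds : List Int) : Decidable (Pre_solution progresses speeds) := by
  unfold Pre_solution; infer_instance

def pvWitness_solution : List Int × List Int := ([93, 30, 55], [1, 30, 5])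

def Spec_solution (progresses : List Int) (speeds : List Int) (out : List Int) : Prop := out = solution_alt progresses speeds
instance (progresses : List Int) (speeds : List Int) (out : List Int) : Decidable (Spec_solution progresses speeds out) := by unfold Spec_solution; infer_instance

-- ===== CLAIM (what is proved, stated in full; the proofs are below) =====
def Claim_equal_solution : Prop := ∀ (progresses : List Int) (speeds : List Int), Dom_solution progresses speeds → Pre_solution progresses speeds → Spec_solution progresses speeds (solution progresses speeds)

-- ===== LEMMAS AND PROOFS =====

-- B's closed-form finish day
def daysOf (ps : Int × Int) : Int :=
  if ps.1 ≥ 100 then 0 else -(PySem.Int.floordiv (ps.1 - 100) ps.2)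

-- B's grouping step, specialised to an already-computed day d
def stepD (st : List Int × Option Int × Int) (d : Int) : List Int × Option Int × Int :=
  let newGroup := match st.2.1 with
    | none => true
    | some c => decide (c < d)
  if newGroup then ((if st.2.2 ≠ 0 then st.1 ++ [st.2.2] else st.1), some d, 1)
  else (st.1, st.2.1, st.2.2 + 1)

def finalize (r : List Int × Option Int × Int) : List Int :=
  if r.2.2 ≠ 0 then r.1 ++ [r.2.2] else r.1

lemma solution_alt_eq (progresses speeds : List Int) :
    solution_alt progresses speeds =
      finalize (((progresses.zip speeds).map daysOf).foldl stepD ([], none, 0)) := by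
  simp only [solution_alt, finalize, List.foldl_map, stepD, daysOf]
  rfl

-- A's inner while loop finds the least n with p + n*s ≥ 100
lemma whileDays_inv (p s N : Int) (hs : 0 < s)
    (h1 : (N - 1) * s < 100 - p) (h2 : 100 - p ≤ N * s) :
    ∀ (fuel : Nat) (n : Int), n ≤ N → N ≤ n + fuel → whileDays fuel p s n = N := by
  intro fuel
  induction fuel with
  | zero => intro n hn hN; simp [whileDays]; omega
  | succ f ih =>
    intro n hn hN
    simp only [whileDays]
    split
    · rename_i hlt
      apply ih
      · have : n * s < N * s := by omega
        have := lt_of_mul_lt_mul_right this (le_of_lt hs)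
        omega
      · omega
    · rename_i hge
      have hnp : 100 - p ≤ n * s := by omega
      have : (N - 1) * s < n * s := lt_of_lt_of_le h1 hnp
      have := lt_of_mul_lt_mul_right this (le_of_lt hs)
      omega

-- the while loop computes B's ceiling division under Pre_'s per-element condition
lemma whileDays_eq (p s : Int) (h : 0 < s ∨ 100 ≤ p) :
    whileDays ((100 - p).toNat + 1) p s 0 = daysOf (p, s) := by
  rcases le_or_gt 100 p with hp | hp
  · simp [whileDays, daysOf, hp]
  · have hs : 0 < s := by omega
    set N := -(PySem.Int.floordiv (p - 100) s) with hNdef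
    have hN : -(PySem.Int.floordiv (-(100 - p)) s) = N := by rw [hNdef]; ring_nf
    obtain ⟨h1, h2⟩ := (PySem.Int.neg_floordiv_neg_eq_iff_of_pos (a := 100 - p) (b := s) (q := N) hs).mp hN
    have hN1 : 1 ≤ N := by
      by_contra hc
      have : N * s ≤ 0 := mul_nonpos_iff.mpr (Or.inr ⟨by omega, by omega⟩)
      omega
    have hNle : N ≤ 100 - p := by
      have : N - 1 ≤ (N - 1) * s := le_mul_of_one_le_right (by omega) (by omega)
      omega
    have hrun : whileDays ((100 - p).toNat + 1) p s 0 = N :=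
      whileDays_inv p s N hs h1 h2 _ 0 (by omega) (by omega)
    rw [hrun, daysOf]
    simp [hNdef]
    omega

lemma map_range_zip (g : Int → Int → Int) :
    ∀ (xs ys : List Int), xs.length ≤ ys.length →
      (List.range xs.length).map (fun k => g (xs.getD k 0) (ys.getD k 0)) =
        (xs.zip ys).map (fun ps => g ps.1 ps.2) := by
  intro xs
  induction xs with
  | nil => intro ys _; simp
  | cons x xs ih =>
    intro ys hlen
    cases ys with
    | nil => simp at hlen
    | cons y ys =>
      simp only [List.length_cons, List.range_succ_eq_map, List.map_cons, List.map_map,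
        List.zip_cons_cons]
      have hlen' : xs.length ≤ ys.length := by simpa using hlen
      rw [← ih ys hlen']
      simp

-- A's day-building fold over range(len(progresses)) is a map over the zipped lists
lemma day_eq (g : Int → Int → Int) (progresses speeds : List Int)
    (hlen : progresses.length ≤ speeds.length) :
    (PySem.List.pyRange 0 progresses.length 1).foldl
      (fun day i => day ++ [g (PySem.List.pyGetD progresses i 0) (PySem.List.pyGetD speeds i 0)]) [] =
    (progresses.zip speeds).map (fun ps => g ps.1 ps.2) := by
  rw [PySem.List.foldl_append_singleton_eq_map]
  rw [PySem.List.pyRange_one]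
  simp only [List.map_map, Int.sub_zero, Int.toNat_natCast]
  rw [← map_range_zip g progresses speeds hlen]
  apply List.map_congr_left
  intro k hk
  simp [Function.comp, PySem.List.pyGetD_natCast]

-- A's pop(0) grouping loop equals B's fold with running (answer, current max, count) state
lemma loopAns_eq (rest : List Int) : ∀ (m n : Int) (answer : List Int), 0 < n →
    loopAns (m :: rest) n answer = finalize (rest.foldl stepD (answer, some m, n)) := by
  induction rest with
  | nil => intro m n answer hn; simp [loopAns, finalize, show n ≠ 0 by omega]
  | cons d rest ih =>
    intro m n answer hn
    by_cases hmd : m ≥ d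
    · have hstep : stepD (answer, some m, n) d = (answer, some m, n + 1) := by
        simp [stepD, show ¬ (m < d) by omega]
      rw [show loopAns (m :: d :: rest) n answer = loopAns (m :: rest) (n + 1) answer from by
        simp [loopAns, hmd]]
      rw [ih m (n + 1) answer (by omega)]
      simp [List.foldl_cons, hstep]
    · have hstep : stepD (answer, some m, n) d = (answer ++ [n], some d, 1) := by
        simp [stepD, show m < d by omega, show n ≠ 0 by omega]
      rw [show loopAns (m :: d :: rest) n answer = loopAns (d :: rest) 1 (answer ++ [n]) from by
        simp [loopAns, hmd]]
      rw [ih d 1 (answer ++ [n]) (by omega)]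
      simp [List.foldl_cons, hstep]

-- ===== VERDICT (by name: the statement is the Claim_ definition above) =====
theorem solution_spec : Claim_equal_solution := by
  intro progresses speeds _hdom hpre
  obtain ⟨hlen, hall⟩ := hpre
  unfold Spec_solution
  rw [solution_alt_eq]
  show loopAns ((PySem.List.pyRange 0 progresses.length 1).foldl
      (fun day i =>
        day ++ [whileDays ((100 - PySem.List.pyGetD progresses i 0).toNat + 1)
          (PySem.List.pyGetD progresses i 0) (PySem.List.pyGetD speeds i 0) 0]) []) 1 [] = _
  rw [day_eq (fun p s => whileDays ((100 - p).toNat + 1) p s 0) progresses speeds hlen]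
  have hday : (progresses.zip speeds).map
      (fun ps => whileDays ((100 - ps.1).toNat + 1) ps.1 ps.2 0) =
      (progresses.zip speeds).map daysOf := by
    apply List.map_congr_left
    intro ps hps
    exact whileDays_eq ps.1 ps.2 (hall ps hps)
  rw [hday]
  cases hz : (progresses.zip speeds).map daysOf with
  | nil => simp [loopAns, finalize]
  | cons d rest =>
    have hfirst : stepD ([], none, 0) d = ([], some d, 1) := by
      simp [stepD]
    rw [loopAns_eq rest d 1 [] (by omega)]
    simp [List.foldl_cons, hfirst]
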